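-- pv_equiv track=rewrite | github.com/kevintaing86/ntontm | encodesTM.py | encodesTM
-- ===== SOURCE A (Python) =====
-- def functional(table):
--     """
--     Checks if table has 2 distinct tuples where the first 2 coordinates are the same.
--     If so return false
--     Otherwise return true
--     :param table: a set of 5-tuples
--     :return: Boolean
--     """
--     if table == []:
--         return False
--     for t1 in table:
--         for t2 in table:
--             if t1[0:2] == t2[0:2] and t1[2:6] != t2[2:6]:
--                 return False
--     return True
--
-- def correct_format(table):
--     """
--     Determines whether or not each instruction in table meets the NTM format.
--     That is, 2nd and 4th coordinate is 0-10 and 5th coordinate it 0-1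
--     :param table: a set of 5-tuples
--     :return: Boolean
--     """
--     for i in table:
--         if i[1] < 0 or i[1] > 10:
--             return False
--         if i[3] < 0 or i[3] > 10:
--             return False
--         if i[4] != 1 and i[4] != 0:
--             return False
--     return True
--
-- def encodesTM(fsn):
--     """
--     Returns true if the fsn can be encoded into a numeric turing machine and false otherwise
--     :param fsn: finite sequence of natural numbers
--     :return: Boolean
--     """
--     if len(fsn) % 5 != 2:
--         return False
--
--     table = []
--     for x in range(2,len(fsn),5):
--         instruc = (fsn[x], fsn[x+1], fsn[x+2], fsn[x+3], fsn[x+4])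
--         table.append(instruc)
--
--     if functional(table) and correct_format(table):
--         return True
--     else:
--         return False
-- ===== SOURCE B (Python) =====
-- def encodesTM(fsn):
--     n = len(fsn)
--     if n % 5 != 2 or n == 2:
--         return False
--     seen = {}
--     for x in range(2, n, 5):
--         f0, f1, f2, f3, f4 = fsn[x], fsn[x + 1], fsn[x + 2], fsn[x + 3], fsn[x + 4]
--         if f1 < 0 or f1 > 10 or f3 < 0 or f3 > 10 or (f4 != 0 and f4 != 1):
--             return False
--         rest = (f2, f3, f4)
--         prev = seen.get((f0, f1))
--         if prev is None:
--             seen[(f0, f1)] = rest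
--         elif prev != rest:
--             return False
--     return True
-- ===== Notes on version B (the rewrite author's own statement) =====
-- stated objective: alternative
-- what changed: Replaced the quadratic all-pairs conflict scan (functional) plus a separate format pass with a single pass that hashes the first two coordinates of each instruction into a dict and checks format and conflicting rest on the fly.
import Mathlib
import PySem

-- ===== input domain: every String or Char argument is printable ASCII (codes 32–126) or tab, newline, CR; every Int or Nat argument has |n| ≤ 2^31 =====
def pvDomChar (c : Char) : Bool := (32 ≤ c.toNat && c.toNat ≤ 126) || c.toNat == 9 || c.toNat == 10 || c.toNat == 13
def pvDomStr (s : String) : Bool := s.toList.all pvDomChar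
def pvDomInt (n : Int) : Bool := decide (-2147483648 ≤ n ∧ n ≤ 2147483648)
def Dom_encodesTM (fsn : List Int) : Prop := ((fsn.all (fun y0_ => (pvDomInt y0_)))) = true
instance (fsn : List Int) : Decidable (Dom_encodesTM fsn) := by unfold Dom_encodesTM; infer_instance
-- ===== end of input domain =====

-- B replaces A's all-pairs conflict scan (functional) plus separate format pass with a
-- single dict-based pass keyed by the first two coordinates; same return value.

-- ===== PORT A =====
def pvFunctional (table : List (Int × Int × Int × Int × Int)) : Bool :=
  if table = [] then false
  else
    ! table.any (fun t1 => table.any (fun t2 =>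
        decide (t1.1 = t2.1 ∧ t1.2.1 = t2.2.1) && ! decide (t1.2.2 = t2.2.2)))

def pvCorrectFormat (table : List (Int × Int × Int × Int × Int)) : Bool :=
  table.all (fun i =>
    ! (decide (i.2.1 < 0) || decide (10 < i.2.1)) &&
    ! (decide (i.2.2.2.1 < 0) || decide (10 < i.2.2.2.1)) &&
    ! (decide (i.2.2.2.2 ≠ 1) && decide (i.2.2.2.2 ≠ 0)))

def encodesTM (fsn : List Int) : Bool :=
  if (fsn.length : Int) % 5 ≠ 2 then false
  else
    let table := (PySem.List.pyRange 2 (fsn.length : Int) 5).foldl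
      (fun acc x => acc ++ [(PySem.List.pyGetD fsn x 0, PySem.List.pyGetD fsn (x+1) 0,
        PySem.List.pyGetD fsn (x+2) 0, PySem.List.pyGetD fsn (x+3) 0,
        PySem.List.pyGetD fsn (x+4) 0)]) []
    if pvFunctional table && pvCorrectFormat table then true else false

-- ===== PORT B =====
def pvAltGo (fsn : List Int) (idxs : List Int)
    (seen : PySem.Dict (Int × Int) (Int × Int × Int)) : Bool :=
  match idxs with
  | [] => true
  | x :: t =>
    let f0 := PySem.List.pyGetD fsn x 0
    let f1 := PySem.List.pyGetD fsn (x+1) 0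
    let f2 := PySem.List.pyGetD fsn (x+2) 0
    let f3 := PySem.List.pyGetD fsn (x+3) 0
    let f4 := PySem.List.pyGetD fsn (x+4) 0
    if f1 < 0 ∨ 10 < f1 ∨ f3 < 0 ∨ 10 < f3 ∨ (f4 ≠ 0 ∧ f4 ≠ 1) then false
    else
      match seen.get? (f0, f1) with
      | none => pvAltGo fsn t (seen.insert (f0, f1) (f2, f3, f4))
      | some prev => if prev ≠ (f2, f3, f4) then false else pvAltGo fsn t seen

def encodesTM_alt (fsn : List Int) : Bool :=
  if (fsn.length : Int) % 5 ≠ 2 ∨ (fsn.length : Int) = 2 then false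
  else pvAltGo fsn (PySem.List.pyRange 2 (fsn.length : Int) 5) PySem.Dict.empty

-- ===== PRECONDITION & SPEC =====
def Spec_encodesTM (fsn : List Int) (out : Bool) : Prop := out = encodesTM_alt fsn
instance (fsn : List Int) (out : Bool) : Decidable (Spec_encodesTM fsn out) := by unfold Spec_encodesTM; infer_instance

-- ===== CLAIM (what is proved, stated in full; the proofs are below) =====
def Claim_equal_encodesTM : Prop := ∀ (fsn : List Int), Dom_encodesTM fsn → Spec_encodesTM fsn (encodesTM fsn)

-- ===== LEMMAS AND PROOFS =====

-- fields of the instruction starting at index x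
def pvG (fsn : List Int) (x : Int) : Int := PySem.List.pyGetD fsn x 0
def pvKey (fsn : List Int) (x : Int) : Int × Int := (pvG fsn x, pvG fsn (x+1))
def pvRst (fsn : List Int) (x : Int) : Int × Int × Int :=
  (pvG fsn (x+2), pvG fsn (x+3), pvG fsn (x+4))
def pvFmt (fsn : List Int) (x : Int) : Prop :=
  ¬ (pvG fsn (x+1) < 0 ∨ 10 < pvG fsn (x+1) ∨ pvG fsn (x+3) < 0 ∨ 10 < pvG fsn (x+3) ∨
     (pvG fsn (x+4) ≠ 0 ∧ pvG fsn (x+4) ≠ 1))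

-- characterisation of B's single pass: format everywhere, instructions with equal
-- keys have equal rests, and rests agree with whatever is already recorded in `seen`
lemma pvAltGo_iff (fsn : List Int) (idxs : List Int)
    (seen : PySem.Dict (Int × Int) (Int × Int × Int)) :
    pvAltGo fsn idxs seen = true ↔
      ((∀ x ∈ idxs, pvFmt fsn x) ∧
       (∀ x ∈ idxs, ∀ y ∈ idxs, pvKey fsn x = pvKey fsn y → pvRst fsn x = pvRst fsn y) ∧
       (∀ x ∈ idxs, ∀ r, seen.get? (pvKey fsn x) = some r → pvRst fsn x = r)) := by
  induction idxs generalizing seen with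
  | nil => simp [pvAltGo]
  | cons x t ih =>
    show (if _ then false else _) = true ↔ _
    by_cases hf : pvFmt fsn x
    · rw [if_neg (by simpa only [pvFmt, pvG, not_not] using hf)]
      have hkx : (PySem.List.pyGetD fsn x 0, PySem.List.pyGetD fsn (x+1) 0) = pvKey fsn x := rfl
      rw [hkx]
      rcases hget : seen.get? (pvKey fsn x) with _ | prev
      · -- fresh key: insert and recurse
        rw [ih]
        constructor
        · rintro ⟨h1, h2, h3⟩
          refine ⟨?_, ?_, ?_⟩
          · intro z hz; rw [List.mem_cons] at hz
            rcases hz with rfl | hz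
            · exact hf
            · exact h1 z hz
          · intro a ha b hb
            rw [List.mem_cons] at ha hb
            rcases ha with rfl | ha <;> rcases hb with rfl | hb
            · intro _; rfl
            · intro hk
              have := h3 b hb (pvRst fsn a)
                (by rw [← hk, PySem.Dict.get?_insert_self]; rfl)
              exact this.symm
            · intro hk
              exact h3 a ha (pvRst fsn b) (by rw [hk, PySem.Dict.get?_insert_self]; rfl)
            · exact h2 a ha b hb
          · intro a ha r hr
            rw [List.mem_cons] at ha
            rcases ha with rfl | ha
            · rw [hget] at hr; cases hr
            · refine h3 a ha r ?_
              rw [PySem.Dict.get?_insert]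
              split_ifs with hk
              · rw [hk, hget] at hr; cases hr
              · exact hr
        · rintro ⟨h1, h2, h3⟩
          refine ⟨fun z hz => h1 z (List.mem_cons_of_mem _ hz), ?_, ?_⟩
          · intro a ha b hb
            exact h2 a (List.mem_cons_of_mem _ ha) b (List.mem_cons_of_mem _ hb)
          · intro a ha r hr
            rw [PySem.Dict.get?_insert] at hr
            split_ifs at hr with hk
            · cases hr
              exact h2 a (List.mem_cons_of_mem _ ha) x (List.mem_cons_self ..) hk
            · exact h3 a (List.mem_cons_of_mem _ ha) r hr
      · -- key already present
        show (if _ then false else _) = true ↔ _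
        by_cases hpr : prev = pvRst fsn x
        · rw [if_neg (by simp [hpr, pvRst, pvG])]
          rw [ih]
          constructor
          · rintro ⟨h1, h2, h3⟩
            refine ⟨?_, ?_, ?_⟩
            · intro z hz; rw [List.mem_cons] at hz
              rcases hz with rfl | hz
              · exact hf
              · exact h1 z hz
            · intro a ha b hb
              rw [List.mem_cons] at ha hb
              rcases ha with rfl | ha <;> rcases hb with rfl | hb
              · intro _; rfl
              · intro hk
                exact ((h3 b hb prev (by rw [← hk, hget])).trans hpr).symm
              · intro hk
                exact (h3 a ha prev (by rw [hk, hget])).trans hpr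
              · exact h2 a ha b hb
            · intro a ha r hr
              rw [List.mem_cons] at ha
              rcases ha with rfl | ha
              · rw [hget] at hr; cases hr; exact hpr.symm
              · exact h3 a ha r hr
          · rintro ⟨h1, h2, h3⟩
            exact ⟨fun z hz => h1 z (List.mem_cons_of_mem _ hz),
              fun a ha b hb => h2 a (List.mem_cons_of_mem _ ha) b (List.mem_cons_of_mem _ hb),
              fun a ha r hr => h3 a (List.mem_cons_of_mem _ ha) r hr⟩
        · rw [if_pos (by simpa using fun h => hpr h)]
          simp only [Bool.false_eq_true, false_iff]
          rintro ⟨-, -, h3⟩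
          exact hpr ((h3 x (List.mem_cons_self ..) prev hget).symm)
    · rw [if_pos (by simpa only [pvFmt, pvG, not_not] using hf)]
      simp only [Bool.false_eq_true, false_iff]
      rintro ⟨h1, -, -⟩
      exact hf (h1 x (List.mem_cons_self ..))

-- characterisation of A's all-pairs scan on the built table
lemma pvFunctional_iff (fsn : List Int) (idxs : List Int) :
    pvFunctional (idxs.map (fun x => (pvG fsn x, pvG fsn (x+1), pvG fsn (x+2),
        pvG fsn (x+3), pvG fsn (x+4)))) = true ↔
      (idxs ≠ [] ∧
       ∀ x ∈ idxs, ∀ y ∈ idxs, pvKey fsn x = pvKey fsn y → pvRst fsn x = pvRst fsn y) := by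
  rcases eq_or_ne idxs [] with rfl | hnil
  · simp [pvFunctional]
  · rw [pvFunctional, if_neg (by simpa using hnil)]
    simp only [Bool.not_eq_true', List.any_eq_false,
      List.any_eq_true, List.mem_map, Bool.and_eq_true, decide_eq_true_eq,
      Bool.not_eq_true', decide_eq_false_iff_not,
      pvKey, pvRst, Prod.mk.injEq]
    push Not
    constructor
    · intro h
      refine ⟨hnil, fun a ha b hb hk => ?_⟩
      have := h _ ⟨a, ha, rfl⟩ _ ⟨b, hb, rfl⟩ ⟨hk.1, hk.2⟩
      exact ⟨congrArg (fun p : ℤ × ℤ × ℤ => p.1) this,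
        congrArg (fun p : ℤ × ℤ × ℤ => p.2.1) this,
        congrArg (fun p : ℤ × ℤ × ℤ => p.2.2) this⟩
    · rintro ⟨-, h⟩ t1 ⟨a, ha, rfl⟩ t2 ⟨b, hb, rfl⟩ hk
      have := h a ha b hb ⟨hk.1, hk.2⟩
      exact Prod.ext this.1 (Prod.ext this.2.1 this.2.2)

-- characterisation of A's format scan
lemma pvCorrectFormat_iff (fsn : List Int) (idxs : List Int) :
    pvCorrectFormat (idxs.map (fun x => (pvG fsn x, pvG fsn (x+1), pvG fsn (x+2),
        pvG fsn (x+3), pvG fsn (x+4)))) = true ↔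
      ∀ x ∈ idxs, pvFmt fsn x := by
  simp only [pvCorrectFormat, List.all_eq_true, List.forall_mem_map, Bool.and_eq_true,
    Bool.not_eq_true', Bool.or_eq_false_iff, Bool.and_eq_false_iff, decide_eq_false_iff_not,
    not_lt, not_not, ne_eq, pvFmt]
  constructor
  · intro h x hx
    obtain ⟨⟨hA, hB⟩, hC⟩ := h x hx
    intro hbad
    rcases hbad with h' | h' | h' | h' | ⟨hz, ho⟩ <;> rcases hC with hC | hC <;>
      [omega; omega; omega; omega; omega; omega; omega; omega; exact ho hC; exact hz hC]
  · intro h x hx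
    have h' := h x hx
    refine ⟨⟨⟨?_, ?_⟩, ⟨?_, ?_⟩⟩, ?_⟩
    · by_contra hc; exact h' (Or.inl (by omega))
    · by_contra hc; exact h' (Or.inr (Or.inl (by omega)))
    · by_contra hc; exact h' (Or.inr (Or.inr (Or.inl (by omega))))
    · by_contra hc; exact h' (Or.inr (Or.inr (Or.inr (Or.inl (by omega)))))
    · by_cases h0 : pvG fsn (x+4) = 0
      · exact Or.inr h0
      · refine Or.inl ?_
        by_contra h1'
        exact h' (Or.inr (Or.inr (Or.inr (Or.inr ⟨h0, h1'⟩))))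

-- ===== VERDICT (by name: the statement is the Claim_ definition above) =====
theorem encodesTM_spec : Claim_equal_encodesTM := by
  intro fsn _
  show encodesTM fsn = encodesTM_alt fsn
  unfold encodesTM encodesTM_alt
  by_cases h5 : (fsn.length : Int) % 5 = 2
  · by_cases h2 : (fsn.length : Int) = 2
    · conv_rhs => rw [if_pos (Or.inr h2)]
      conv_lhs => rw [if_neg (not_not_intro h5)]
      rw [h2]
      rfl
    · conv_rhs => rw [if_neg (by push Not; exact ⟨h5, h2⟩)]
      conv_lhs => rw [if_neg (not_not_intro h5)]
      have htab : (PySem.List.pyRange 2 (fsn.length : Int) 5).foldl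
          (fun acc x => acc ++ [(PySem.List.pyGetD fsn x 0, PySem.List.pyGetD fsn (x+1) 0,
            PySem.List.pyGetD fsn (x+2) 0, PySem.List.pyGetD fsn (x+3) 0,
            PySem.List.pyGetD fsn (x+4) 0)]) [] =
          (PySem.List.pyRange 2 (fsn.length : Int) 5).map
            (fun x => (pvG fsn x, pvG fsn (x+1), pvG fsn (x+2), pvG fsn (x+3), pvG fsn (x+4))) :=
        PySem.List.foldl_append_singleton_eq_map ..
      simp only [htab]
      have hmem : (2 : Int) ∈ PySem.List.pyRange 2 (fsn.length : Int) 5 := by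
        rw [PySem.List.mem_pyRange_iff_of_pos (by omega)]
        have : (0 : Int) ≤ (fsn.length : Int) := Int.natCast_nonneg _
        omega
      have hnil : PySem.List.pyRange 2 (fsn.length : Int) 5 ≠ [] :=
        List.ne_nil_of_mem hmem
      have key : (pvFunctional ((PySem.List.pyRange 2 (fsn.length : Int) 5).map
            (fun x => (pvG fsn x, pvG fsn (x+1), pvG fsn (x+2), pvG fsn (x+3), pvG fsn (x+4)))) &&
          pvCorrectFormat ((PySem.List.pyRange 2 (fsn.length : Int) 5).map
            (fun x => (pvG fsn x, pvG fsn (x+1), pvG fsn (x+2), pvG fsn (x+3), pvG fsn (x+4))))) = true ↔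
          pvAltGo fsn (PySem.List.pyRange 2 (fsn.length : Int) 5) PySem.Dict.empty = true := by
        rw [Bool.and_eq_true, pvFunctional_iff, pvCorrectFormat_iff, pvAltGo_iff]
        constructor
        · rintro ⟨⟨-, hcons⟩, hfmt⟩
          exact ⟨hfmt, hcons, fun a _ r hr => by
            rw [PySem.Dict.get?_empty] at hr; cases hr⟩
        · rintro ⟨hfmt, hcons, -⟩
          exact ⟨⟨hnil, hcons⟩, hfmt⟩
      cases hFC : (pvFunctional ((PySem.List.pyRange 2 (fsn.length : Int) 5).map
            (fun x => (pvG fsn x, pvG fsn (x+1), pvG fsn (x+2), pvG fsn (x+3), pvG fsn (x+4)))) &&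
          pvCorrectFormat ((PySem.List.pyRange 2 (fsn.length : Int) 5).map
            (fun x => (pvG fsn x, pvG fsn (x+1), pvG fsn (x+2), pvG fsn (x+3), pvG fsn (x+4))))) with
      | false =>
        cases hB : pvAltGo fsn (PySem.List.pyRange 2 (fsn.length : Int) 5) PySem.Dict.empty with
        | false => simp
        | true => rw [key.mpr hB] at hFC; cases hFC
      | true =>
        rw [key.mp hFC]
        simp
  · rw [if_pos h5, if_pos (Or.inl h5)]
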